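-- pv_equiv track=rewrite | github.com/Eilhwan/algorithms | algorithms/2023.11/brick.py | solution
-- ===== SOURCE A (Python) =====
-- def solution(l, x):
--     n = len(x)
--     bricks = [(x[i], x[i] + l) for i in range(n)]
--     bricks.sort()
--
--     heights = {0}  # 초기 높이 0을 포함
--     max_height = 0
--
--     for i in range(n):
--         new_heights = set()
--         for height in heights:
--             if bricks[i][0] >= height:
--                 new_heights.add(height + 1)
--         heights.update(new_heights)
--         max_height = max(max_height, max(heights))
--
--     result = list(range(1, max_height + 1))
--     return result
-- ===== SOURCE B (Python) =====
-- def solution(l, x):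
--     cnt = 0
--     for s in sorted(x):
--         if s >= cnt:
--             cnt += 1
--     return list(range(1, cnt + 1))
-- ===== Notes on version B (the rewrite author's own statement) =====
-- stated objective: faster
-- what changed: A builds (start, start+l) pairs and grows a set of reachable heights with a quadratic inner loop per brick; B sorts the starts once and runs a single greedy counter (increment when start >= counter), since A's height set is always exactly {0..k}.
import Mathlib
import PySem

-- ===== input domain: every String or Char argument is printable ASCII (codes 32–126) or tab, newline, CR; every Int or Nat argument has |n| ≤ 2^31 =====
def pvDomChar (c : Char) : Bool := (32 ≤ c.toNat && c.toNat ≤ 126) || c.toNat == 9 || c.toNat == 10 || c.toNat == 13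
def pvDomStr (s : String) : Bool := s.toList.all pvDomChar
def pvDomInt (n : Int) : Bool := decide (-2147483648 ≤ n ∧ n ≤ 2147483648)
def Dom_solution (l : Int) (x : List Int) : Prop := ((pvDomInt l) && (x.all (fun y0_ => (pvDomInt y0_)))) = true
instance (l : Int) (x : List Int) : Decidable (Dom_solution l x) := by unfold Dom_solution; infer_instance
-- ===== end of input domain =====

-- B replaces A's O(n·answer) set-expansion loop by a single greedy counter over the sorted starts (O(n log n)); return value only, A does not observably mutate its arguments.

-- ===== PORT A =====
-- literal port of Source A: build (start, start+l) bricks, sort them, grow the set of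
-- reachable heights brick by brick, track the running maximum, return list(range(1, max+1)).
-- max(heights) is ported as (max? …).getD 0; heights always contains 0, so the default is never used.
def solution (l : Int) (x : List Int) : List Int :=
  let bricks0 := x.map (fun xi => (xi, xi + l))
  let bricks := PySem.List.sorted2 bricks0 (fun p => p.1) (fun p => p.2) false
  let st :=
    bricks.foldl
      (fun st b =>
        let new_heights :=
          st.1.foldl (fun nh h => if b.1 ≥ h then PySem.Set.add nh (h + 1) else nh)
            PySem.Set.empty
        let heights := PySem.Set.update st.1 new_heights
        let maxh := max st.2 ((PySem.List.max? heights (fun v => v)).getD 0)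
        (heights, maxh))
      ((PySem.Set.ofList [(0 : Int)], (0 : Int)) : PySem.Set Int × Int)
  PySem.List.pyRange 1 (st.2 + 1) 1

-- ===== PORT B =====
-- literal port of Source B: sort the starts, one greedy counter, return list(range(1, cnt+1)).
def solution_alt (l : Int) (x : List Int) : List Int :=
  let cnt :=
    (PySem.List.sorted x (fun v => v) false).foldl
      (fun c s => if s ≥ c then c + 1 else c) (0 : Int)
  PySem.List.pyRange 1 (cnt + 1) 1

-- ===== PRECONDITION & SPEC =====
def Spec_solution (l : Int) (x : List Int) (out : List Int) : Prop := out = solution_alt l x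
instance (l : Int) (x : List Int) (out : List Int) : Decidable (Spec_solution l x out) := by unfold Spec_solution; infer_instance

-- ===== CLAIM (what is proved, stated in full; the proofs are below) =====
def Claim_equal_solution : Prop := ∀ (l : Int) (x : List Int), Dom_solution l x → Spec_solution l x (solution l x)

-- ===== LEMMAS AND PROOFS =====

-- the set of heights A maintains is always {0, 1, …, k} in insertion order
def canonH (k : Nat) : List Int := (List.range (k + 1)).map (fun n : Nat => (n : Int))

-- A's outer-loop body, named (definitionally the lambda inside `solution`)
def stepAfn (st : PySem.Set Int × Int) (b : Int × Int) : PySem.Set Int × Int :=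
  let new_heights :=
    st.1.foldl (fun nh h => if b.1 ≥ h then PySem.Set.add nh (h + 1) else nh)
      PySem.Set.empty
  let heights := PySem.Set.update st.1 new_heights
  let maxh := max st.2 ((PySem.List.max? heights (fun v => v)).getD 0)
  (heights, maxh)

-- B's greedy counter, run on naturals
def greedy (ss : List Int) (k : Nat) : Nat :=
  ss.foldl (fun k s => if (k : Int) ≤ s then k + 1 else k) k

lemma solution_eq (l : Int) (x : List Int) :
    solution l x =
      PySem.List.pyRange 1
        (((PySem.List.sorted2 (x.map (fun xi => (xi, xi + l))) (fun p => p.1) (fun p => p.2)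
              false).foldl stepAfn (PySem.Set.ofList [(0 : Int)], (0 : Int))).2 + 1) 1 := rfl

lemma insertBy_map {α β : Type} (f : α → β) (p : β → β → Bool) (q : α → α → Bool)
    (h : ∀ a b, p (f a) (f b) = q a b) (a : α) (ys : List α) :
    PySem.List.insertBy p (f a) (ys.map f) = (PySem.List.insertBy q a ys).map f := by
  induction ys with
  | nil => simp [PySem.List.insertBy]
  | cons y ys ih =>
    simp only [List.map_cons, PySem.List.insertBy, h]
    by_cases hq : q a y = true
    · simp [hq]
    · simp only [Bool.not_eq_true] at hq
      simp [hq, ih]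

lemma foldl_insertBy_map {α β : Type} (f : α → β) (p : β → β → Bool) (q : α → α → Bool)
    (h : ∀ a b, p (f a) (f b) = q a b) (xs : List α) (acc : List α) :
    (xs.map f).foldl (fun acc x => PySem.List.insertBy p x acc) (acc.map f)
      = (xs.foldl (fun acc x => PySem.List.insertBy q x acc) acc).map f := by
  induction xs generalizing acc with
  | nil => simp
  | cons x xs ih =>
    simp only [List.map_cons, List.foldl_cons, insertBy_map f p q h]
    exact ih _

-- sorting the (start, start+l) pairs is sorting the starts
lemma sorted_pairs (l : Int) (x : List Int) :
    PySem.List.sorted2 (x.map (fun xi => (xi, xi + l))) (fun p => p.1) (fun p => p.2) false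
      = (PySem.List.sorted x (fun v => v) false).map (fun xi => (xi, xi + l)) := by
  simp only [PySem.List.sorted2, PySem.List.sorted, if_neg (by simp : ¬ (false = true))]
  have := foldl_insertBy_map (fun xi : Int => (xi, xi + l))
    (fun a b => decide (a.1 < b.1) || !decide (b.1 < a.1) && decide (a.2 < b.2))
    (fun a b => decide (a < b))
    (by
      intro a b
      by_cases hab : a < b
      · simp [hab]
      · by_cases hba : b < a
        · simp [hab, hba, (show ¬ (a + l < b + l) by omega)]
        · simp [hab, hba, (show ¬ (a + l < b + l) by omega)])
  simpa using this x []

lemma max?_canonH (k : Nat) : PySem.List.max? (canonH k) (fun v => v) = some (k : Int) := by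
  induction k with
  | zero => decide
  | succ k ih =>
    have hc : canonH (k + 1) = canonH k ++ [((k : Int) + 1)] := by
      simp [canonH, List.range_succ]
    rw [hc]
    simp only [PySem.List.max?] at ih ⊢
    rw [List.foldl_append, ih]
    simp only [List.foldl_cons, List.foldl_nil]
    rw [if_pos (by omega)]
    norm_cast

lemma mem_canonH (k : Nat) (e : Int) : e ∈ canonH k ↔ 0 ≤ e ∧ e ≤ (k : Int) := by
  simp only [canonH, List.mem_map, List.mem_range]
  constructor
  · rintro ⟨n, hn, rfl⟩
    omega
  · rintro ⟨h0, hk⟩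
    exact ⟨e.toNat, by omega, by omega⟩

-- A's inner loop over {0,…,k}: the new heights are 1,…,min(k+1, s+1)
lemma inner_fold (s : Int) (n : Nat) :
    (List.range n).foldl
        (fun nh h => if s ≥ ((h : Nat) : Int) then PySem.Set.add nh (((h : Nat) : Int) + 1) else nh)
        PySem.Set.empty
      = (List.range (min n (s + 1).toNat)).map (fun h : Nat => (h : Int) + 1) := by
  induction n with
  | zero => simp [PySem.Set.empty]
  | succ n ih =>
    rw [List.range_succ, List.foldl_append, ih]
    simp only [List.foldl_cons, List.foldl_nil]
    by_cases hs : s ≥ (n : Int)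
    · rw [if_pos hs]
      have hmn : min n (s + 1).toNat = n := by omega
      have hmn1 : min (n + 1) (s + 1).toNat = n + 1 := by omega
      rw [hmn, hmn1]
      rw [PySem.Set.add, if_neg]
      · simp [List.range_succ]
      · simp only [PySem.Set.contains, List.contains_eq_mem, List.mem_map, List.mem_range,
          decide_eq_true_eq]
        rintro ⟨h, hh, he⟩
        omega
    · rw [if_neg hs]
      have hmm : min n (s + 1).toNat = min (n + 1) (s + 1).toNat := by omega
      rw [hmm]

-- updating {0,…,k} with elements already ≤ k changes nothing
lemma update_canonH_le (k : Nat) (m : Nat) (hm : m ≤ k) :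
    PySem.Set.update (canonH k) ((List.range m).map (fun h : Nat => (h : Int) + 1)) = canonH k := by
  induction m with
  | zero => simp [PySem.Set.update]
  | succ m ih =>
    simp only [PySem.Set.update] at ih ⊢
    rw [List.range_succ, List.map_append, List.foldl_append, ih (by omega)]
    simp only [List.map_cons, List.map_nil, List.foldl_cons, List.foldl_nil]
    rw [PySem.Set.add, if_pos]
    simp only [PySem.Set.contains, List.contains_eq_mem, decide_eq_true_eq]
    rw [mem_canonH]
    omega

lemma update_canonH_succ (k : Nat) :
    PySem.Set.update (canonH k) ((List.range (k + 1)).map (fun h : Nat => (h : Int) + 1))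
      = canonH (k + 1) := by
  simp only [PySem.Set.update]
  rw [List.range_succ, List.map_append, List.foldl_append]
  rw [show List.foldl PySem.Set.add (canonH k) ((List.range k).map (fun h : Nat => (h : Int) + 1))
        = canonH k from update_canonH_le k k le_rfl]
  simp only [List.map_cons, List.map_nil, List.foldl_cons, List.foldl_nil]
  rw [PySem.Set.add, if_neg]
  · simp [canonH, List.range_succ]
  · simp only [PySem.Set.contains, List.contains_eq_mem, decide_eq_true_eq]
    rw [mem_canonH]
    omega

-- one iteration of A's outer loop on the canonical state
lemma stepA_canonH (l' : Int) (s : Int) (k : Nat) :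
    stepAfn (canonH k, (k : Int)) (s, s + l')
      = (canonH (if (k : Int) ≤ s then k + 1 else k),
         ((if (k : Int) ≤ s then k + 1 else k : Nat) : Int)) := by
  have hfold : (canonH k).foldl
      (fun nh h => if s ≥ h then PySem.Set.add nh (h + 1) else nh) PySem.Set.empty
      = (List.range (min (k + 1) (s + 1).toNat)).map (fun h : Nat => (h : Int) + 1) := by
    rw [canonH, List.foldl_map]
    exact inner_fold s (k + 1)
  simp only [stepAfn]
  rw [hfold]
  by_cases hs : (k : Int) ≤ s
  · have hmin : min (k + 1) (s + 1).toNat = k + 1 := by omega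
    rw [if_pos hs, hmin, update_canonH_succ, max?_canonH]
    simp only [Option.getD_some, Prod.mk.injEq, true_and]
    omega
  · have hmin : min (k + 1) (s + 1).toNat ≤ k := by omega
    rw [if_neg hs, update_canonH_le k _ hmin, max?_canonH]
    simp only [Option.getD_some, Prod.mk.injEq, true_and]
    omega

-- A's outer loop, started on the canonical state, computes B's counter
lemma loopA_eq_greedy (l' : Int) (ss : List Int) (k : Nat) :
    (ss.map (fun xi => (xi, xi + l'))).foldl stepAfn (canonH k, (k : Int))
      = (canonH (greedy ss k), ((greedy ss k : Nat) : Int)) := by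
  induction ss generalizing k with
  | nil => simp [greedy]
  | cons s ss ih =>
    simp only [List.map_cons, List.foldl_cons]
    rw [stepA_canonH l' s k]
    have hg : greedy (s :: ss) k = greedy ss (if (k : Int) ≤ s then k + 1 else k) := by
      simp only [greedy, List.foldl_cons]
    rw [hg]
    exact ih _

lemma greedy_int (ss : List Int) (k : Nat) :
    ss.foldl (fun c s => if s ≥ c then c + 1 else c) ((k : Nat) : Int)
      = ((greedy ss k : Nat) : Int) := by
  induction ss generalizing k with
  | nil => simp [greedy]
  | cons s ss ih =>
    simp only [List.foldl_cons, greedy, ge_iff_le]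
    by_cases hs : (k : Int) ≤ s
    · rw [if_pos hs, if_pos hs]
      rw [show ((k : Int) + 1) = (((k + 1 : Nat)) : Int) by push_cast; ring]
      exact ih (k + 1)
    · rw [if_neg hs, if_neg hs]
      exact ih k

-- ===== VERDICT (by name: the statement is the Claim_ definition above) =====
theorem solution_spec : Claim_equal_solution := by
  intro l x _
  unfold Spec_solution
  rw [solution_eq, sorted_pairs l x]
  rw [show ((PySem.Set.ofList [(0 : Int)], (0 : Int)) : PySem.Set Int × Int)
        = (canonH 0, ((0 : Nat) : Int)) by decide]
  rw [loopA_eq_greedy l (PySem.List.sorted x (fun v => v) false) 0]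
  unfold solution_alt
  rw [show (0 : Int) = ((0 : Nat) : Int) from rfl,
    greedy_int (PySem.List.sorted x (fun v => v) false) 0]
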